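-- pv_equiv track=rewrite | github.com/cs-cordero/interview-prep | leetcode/1168_optimize_water_distribution_in_a_village.py | minCostToSupplyWater
-- ===== SOURCE A (Python) =====
-- from typing import List, NamedTuple
--
-- class Cost(NamedTuple):
--     cost: int
--     source: str
--     target: str
--
-- def minCostToSupplyWater(
--     n: int, wells: List[int], pipes: List[List[int]]
-- ) -> int:
--     well_map = {str(well): well for well, _ in enumerate(wells)}
--     well_map["WATER"] = len(well_map)
--     well_map_inverse = {i: well for well, i in well_map.items()}
--
--     parents = list(range(len(well_map)))
--     ranks = [0] * len(parents)
--
--     def find(well: str) -> str: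
--         well_index = well_map[well]
--         if parents[well_index] != well_index:
--             parents[well_index] = find(well_map_inverse[parents[well_index]])
--         return parents[well_index]
--
--     def union(source: str, target: str) -> bool:
--         parent_source = find(source)
--         parent_target = find(target)
--         if parent_source == parent_target:
--             return False
--
--         rank_source = ranks[parent_source]
--         rank_target = ranks[parent_target]
--         if rank_source > rank_target:
--             parents[parent_target] = parent_source
--         elif rank_source < rank_target:
--             parents[parent_source] = parent_target
--         else:
--             parents[parent_source] = parent_target
--             ranks[parent_target] += 1
--         return True
--
--     costs_to_dig_well = [
--         Cost(cost, str(well), "WATER") for well, cost in enumerate(wells)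
--     ]
--     costs_to_dig_pipe = [
--         Cost(cost, str(house1 - 1), str(house2 - 1))
--         for house1, house2, cost in pipes
--     ]
--     costs = costs_to_dig_well + costs_to_dig_pipe
--     costs.sort()
--
--     total_expenditure = 0
--     for cost, source, target in costs:
--         if union(str(source), str(target)):
--             total_expenditure += cost
--     return total_expenditure
-- ===== SOURCE B (Python) =====
-- from typing import List
--
--
-- def minCostToSupplyWater(
--     n: int, wells: List[int], pipes: List[List[int]]
-- ) -> int:
--     # Kruskal by component relabelling: sort the same (cost, source, target)
--     # edge triples, keep a dict mapping node name -> component id, and merge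
--     # two components by rewriting one id to the other (no union-find).
--     edges = [(cost, str(i), "WATER") for i, cost in enumerate(wells)]
--     edges += [(p[2], str(p[0] - 1), str(p[1] - 1)) for p in pipes]
--     edges.sort()
--
--     comp = {str(i): i for i, _ in enumerate(wells)}
--     comp["WATER"] = len(wells)
--
--     total = 0
--     for cost, u, v in edges:
--         cu, cv = comp[u], comp[v]
--         if cu != cv:
--             total += cost
--             comp = {k: (cv if c == cu else c) for k, c in comp.items()}
--     return total
-- ===== Notes on version B (the rewrite author's own statement) =====
-- stated objective: alternative
-- what changed: Replaces A's union-find (recursive find with path compression and union by rank over string-keyed dicts) by Kruskal with an explicit component-labelling dict: the same sorted edge list is scanned once, each node maps to a component id, and a merge rewrites one id to the other, so no parent/rank arrays and no recursion remain.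
import Mathlib
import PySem

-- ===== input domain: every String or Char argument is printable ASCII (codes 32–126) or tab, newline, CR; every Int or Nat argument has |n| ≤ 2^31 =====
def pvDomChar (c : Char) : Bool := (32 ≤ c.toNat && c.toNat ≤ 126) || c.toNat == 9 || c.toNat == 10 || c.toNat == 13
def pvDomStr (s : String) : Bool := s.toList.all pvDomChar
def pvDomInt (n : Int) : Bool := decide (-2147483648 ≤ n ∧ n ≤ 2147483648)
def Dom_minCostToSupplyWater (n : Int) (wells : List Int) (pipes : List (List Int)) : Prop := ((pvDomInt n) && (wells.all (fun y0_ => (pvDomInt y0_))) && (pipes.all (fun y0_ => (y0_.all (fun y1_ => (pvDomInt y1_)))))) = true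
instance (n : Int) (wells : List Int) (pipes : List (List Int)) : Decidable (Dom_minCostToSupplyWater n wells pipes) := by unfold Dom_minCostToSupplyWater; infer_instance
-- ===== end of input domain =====

-- B replaces A's union-find (path compression + ranks) by Kruskal with explicit
-- component relabelling over a dict (objective: alternative, same results).

-- ===== PORT A =====
-- shared name helper: Python's str(i)
def pvStr (i : Int) : String := PySem.Int.toStr i

-- Python sort key for the (cost, source, target) triples: Python compares
-- tuples lexicographically, strings code-point-wise (= Lean's String `<`).
def pvKey (e : Int × String × String) : Lex (Int × Lex (String × String)) :=
  toLex (e.1, toLex (e.2.1, e.2.2))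

-- A's recursive `find` with path compression.  The Nat argument is a fuel
-- guard making the recursion structural; callers pass more fuel than the
-- recursion can consume (see pvFindA_spec below), so it is never exhausted.
-- Dict/list lookups use the total getD forms: under Pre_ the keys/indices
-- are always present, exactly as in the Python.
def pvFindA (wm : PySem.Dict String Int) (inv : PySem.Dict Int String) :
    Nat → List Int → String → List Int × Int
  | 0, parents, _ => (parents, 0)
  | fuel+1, parents, well =>
    let idx := wm.getD well 0
    if PySem.List.pyGetD parents idx 0 ≠ idx then
      let pr := pvFindA wm inv fuel parents (inv.getD (PySem.List.pyGetD parents idx 0) "")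
      let p2 := PySem.List.pySetD pr.1 idx pr.2
      (p2, PySem.List.pyGetD p2 idx 0)
    else (parents, PySem.List.pyGetD parents idx 0)

-- A's `union` (union by rank); returns the updated parents, ranks and the flag
def pvUnionA (wm : PySem.Dict String Int) (inv : PySem.Dict Int String)
    (parents ranks : List Int) (s t : String) : List Int × List Int × Bool :=
  let f1 := pvFindA wm inv (parents.length + 1) parents s
  let f2 := pvFindA wm inv (f1.1.length + 1) f1.1 t
  let ps := f1.2
  let pt := f2.2
  if ps = pt then (f2.1, ranks, false)
  else
    let rs := PySem.List.pyGetD ranks ps 0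
    let rt := PySem.List.pyGetD ranks pt 0
    if rs > rt then (PySem.List.pySetD f2.1 pt ps, ranks, true)
    else if rs < rt then (PySem.List.pySetD f2.1 ps pt, ranks, true)
    else (PySem.List.pySetD f2.1 ps pt, PySem.List.pySetD ranks pt (rt + 1), true)

def minCostToSupplyWater (n : Int) (wells : List Int) (pipes : List (List Int)) : Int :=
  let wm0 := (PySem.List.enumerate wells).foldl
    (fun d p => d.insert (pvStr p.1) p.1) (PySem.Dict.empty : PySem.Dict String Int)
  let wm := wm0.insert "WATER" (wm0.size : Int)
  let inv := wm.items.foldl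
    (fun d p => d.insert p.2 p.1) (PySem.Dict.empty : PySem.Dict Int String)
  let parents0 := PySem.List.pyRange 0 (wm.size : Int)
  let ranks0 := PySem.List.pyRepeat [(0 : Int)] (PySem.List.len parents0)
  let costsW := (PySem.List.enumerate wells).map (fun p => (p.2, pvStr p.1, "WATER"))
  let costsP := pipes.map (fun l => match l with
    | [h1, h2, c] => (c, pvStr (h1 - 1), pvStr (h2 - 1))
    | _ => ((0 : Int), "", ""))   -- fallback unreachable under Pre_ (Python's unpacking raises otherwise)
  let costs := PySem.List.sorted (costsW ++ costsP) pvKey false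
  -- `union(str(source), str(target))`: str() of a str is the identity
  (costs.foldl (fun st e =>
      let u := pvUnionA wm inv st.1 st.2.1 e.2.1 e.2.2
      (u.1, u.2.1, if u.2.2 then st.2.2 + e.1 else st.2.2))
    (parents0, ranks0, (0 : Int))).2.2

-- ===== PORT B =====
-- B-side name helper and sort key (B's own copies of str(i) and the tuple key)
def pvStrB (i : Int) : String := PySem.Int.toStr i

def pvKeyB (e : Int × String × String) : Lex (Int × Lex (String × String)) :=
  toLex (e.1, toLex (e.2.1, e.2.2))

def minCostToSupplyWater_alt (n : Int) (wells : List Int) (pipes : List (List Int)) : Int :=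
  let edgesW := (PySem.List.enumerate wells).map (fun p => (p.2, pvStrB p.1, "WATER"))
  -- p[0], p[1], p[2]: indices in range under Pre_, so the total getD form is exact
  let edgesP := pipes.map (fun p => (PySem.List.pyGetD p 2 0,
    pvStrB (PySem.List.pyGetD p 0 0 - 1), pvStrB (PySem.List.pyGetD p 1 0 - 1)))
  let edges := PySem.List.sorted (edgesW ++ edgesP) pvKeyB false
  let comp0 := ((PySem.List.enumerate wells).foldl
    (fun d p => d.insert (pvStrB p.1) p.1) (PySem.Dict.empty : PySem.Dict String Int)).insert
    "WATER" (wells.length : Int)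
  (edges.foldl (fun st e =>
      let cu := st.1.getD e.2.1 0
      let cv := st.1.getD e.2.2 0
      if cu ≠ cv then
        (st.1.items.foldl (fun d q => d.insert q.1 (if q.2 = cu then cv else q.2))
          (PySem.Dict.empty : PySem.Dict String Int), st.2 + e.1)
      else st)
    (comp0, (0 : Int))).2

-- ===== PRECONDITION & SPEC =====
-- Pre_ excludes exactly the inputs on which A raises: a pipe that is not a
-- 3-element [house1, house2, cost] list (unpacking raises ValueError), or a
-- pipe endpoint outside 1..len(wells) (well_map[str(house-1)] raises KeyError).
def Pre_minCostToSupplyWater (n : Int) (wells : List Int) (pipes : List (List Int)) : Prop :=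
  ∀ l ∈ pipes, l.length = 3 ∧ 1 ≤ l.getD 0 0 ∧ l.getD 0 0 ≤ (wells.length : Int) ∧
    1 ≤ l.getD 1 0 ∧ l.getD 1 0 ≤ (wells.length : Int)
instance (n : Int) (wells : List Int) (pipes : List (List Int)) : Decidable (Pre_minCostToSupplyWater n wells pipes) := by unfold Pre_minCostToSupplyWater; infer_instance

def pvWitness_minCostToSupplyWater : Int × List Int × List (List Int) := (3, [1, 2, 2], [[1, 2, 1], [2, 3, 1]])

def Spec_minCostToSupplyWater (n : Int) (wells : List Int) (pipes : List (List Int)) (out : Int) : Prop := out = minCostToSupplyWater_alt n wells pipes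
instance (n : Int) (wells : List Int) (pipes : List (List Int)) (out : Int) : Decidable (Spec_minCostToSupplyWater n wells pipes out) := by unfold Spec_minCostToSupplyWater; infer_instance

-- ===== CLAIM (what is proved, stated in full; the proofs are below) =====
def Claim_equal_minCostToSupplyWater : Prop := ∀ (n : Int) (wells : List Int) (pipes : List (List Int)), Dom_minCostToSupplyWater n wells pipes → Pre_minCostToSupplyWater n wells pipes → Spec_minCostToSupplyWater n wells pipes (minCostToSupplyWater n wells pipes)

-- ===== LEMMAS AND PROOFS =====

-- ---------- proof-side helper definitions ----------
-- node i's name: houses 0..M-1 are str(i), the virtual water node M is "WATER"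
def pvName (M i : Int) : String := if i = M then "WATER" else pvStr i
-- parent / rank of node i as the ports read them
def pvPar (p : List Int) (i : Int) : Int := PySem.List.pyGetD p i 0
def pvRk (r : List Int) (i : Int) : Int := PySem.List.pyGetD r i 0
def pvIter (p : List Int) : Nat → Int → Int
  | 0, i => i
  | k+1, i => pvIter p k (pvPar p i)
def pvChain (p : List Int) (i r : Int) : Prop := ∃ k, pvIter p k i = r
def pvRootRel (p : List Int) (i r : Int) : Prop := pvChain p i r ∧ pvPar p r = r
def pvSame (p : List Int) (i j : Int) : Prop := ∃ r, pvRootRel p i r ∧ pvRootRel p j r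
def pvRootsCount (M : Int) (p : List Int) : Int :=
  (((PySem.List.pyRange 0 (M+1)).filter (fun i => pvPar p i == i)).length : Int)
-- the union-find invariant: shapes, rank monotonicity along links, and the
-- counting bound  rank + #roots ≤ M+1  that bounds recursion depth
def pvInvP (M : Int) (p rks : List Int) : Prop :=
  p.length = (M+1).toNat ∧ rks.length = (M+1).toNat ∧
  (∀ i, 0 ≤ i → i ≤ M → 0 ≤ pvPar p i ∧ pvPar p i ≤ M) ∧
  (∀ i, 0 ≤ i → i ≤ M → 0 ≤ pvRk rks i) ∧
  (∀ i, 0 ≤ i → i ≤ M → pvPar p i ≠ i → pvRk rks i < pvRk rks (pvPar p i)) ∧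
  (∀ i, 0 ≤ i → i ≤ M → pvRk rks i + pvRootsCount M p ≤ M + 1) ∧
  (∃ r, 0 ≤ r ∧ r ≤ M ∧ pvPar p r = r)
def pvCf (M : Int) (comp : PySem.Dict String Int) (i : Int) : Int := comp.getD (pvName M i) 0

-- ---------- strings ----------
lemma pvDigitChar_inj (a b : Nat) (ha : a < 10) (hb : b < 10)
    (h : Nat.digitChar a = Nat.digitChar b) : a = b := by
  have key : ∀ x y : Fin 10, Nat.digitChar x.1 = Nat.digitChar y.1 → x = y := by decide
  have := key ⟨a, ha⟩ ⟨b, hb⟩ h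
  exact congrArg Fin.val this

lemma pvToDigits_inj : ∀ m n : Nat, Nat.toDigits 10 m = Nat.toDigits 10 n → m = n := by
  intro m
  induction m using Nat.strong_induction_on with
  | _ m IH =>
    intro n h
    rw [Nat.toDigits_eq_if (b := 10) (n := n) (by norm_num)] at h
    rw [Nat.toDigits_eq_if (b := 10) (n := m) (by norm_num)] at h
    by_cases hm : m < 10 <;> by_cases hn : n < 10
    · rw [if_pos hm, if_pos hn] at h
      injection h with h1 _
      exact pvDigitChar_inj _ _ hm hn h1
    · rw [if_pos hm, if_neg hn] at h
      have hlen := congrArg List.length h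
      rw [List.length_append] at hlen
      simp only [List.length_cons, List.length_nil] at hlen
      have hp := Nat.length_toDigits_pos (b := 10) (n := n / 10)
      omega
    · rw [if_neg hm, if_pos hn] at h
      have hlen := congrArg List.length h
      rw [List.length_append] at hlen
      simp only [List.length_cons, List.length_nil] at hlen
      have hp := Nat.length_toDigits_pos (b := 10) (n := m / 10)
      omega
    · rw [if_neg hm, if_neg hn] at h
      have h2 := List.append_inj' h (by simp)
      injection h2.2 with hhd _
      have e1 : m % 10 = n % 10 :=
        pvDigitChar_inj _ _ (Nat.mod_lt _ (by norm_num)) (Nat.mod_lt _ (by norm_num)) hhd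
      have e2 : m / 10 = n / 10 :=
        IH (m / 10) (Nat.div_lt_self (by omega) (by norm_num)) _ h2.1
      omega

lemma pvStr_inj {i j : Int} (hi : 0 ≤ i) (hj : 0 ≤ j) (h : pvStr i = pvStr j) : i = j := by
  unfold pvStr PySem.Int.toStr PySem.Int.toChars at h
  rw [if_neg (by omega), if_neg (by omega)] at h
  have h2 := congrArg String.toList h
  rw [String.toList_ofList, String.toList_ofList] at h2
  have := pvToDigits_inj _ _ h2
  omega

lemma pvStr_ne_WATER (i : Int) : pvStr i ≠ "WATER" := by
  intro h
  unfold pvStr PySem.Int.toStr PySem.Int.toChars at h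
  have h2 := congrArg String.toList h
  rw [String.toList_ofList] at h2
  have hW : "WATER".toList = ['W', 'A', 'T', 'E', 'R'] := rfl
  rw [hW] at h2
  by_cases hi : i < 0
  · rw [if_pos hi] at h2
    exact absurd (List.head_eq_of_cons_eq h2) (by decide)
  · rw [if_neg hi] at h2
    have hw : 'W' ∈ Nat.toDigits 10 i.toNat := by rw [h2]; simp
    have := Nat.isDigit_of_mem_toDigits (by norm_num) (by norm_num) hw
    exact absurd this (by decide)

lemma pvName_inj {M i j : Int} (hi0 : 0 ≤ i) (hiM : i ≤ M) (hj0 : 0 ≤ j) (hjM : j ≤ M)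
    (h : pvName M i = pvName M j) : i = j := by
  unfold pvName at h
  by_cases h1 : i = M <;> by_cases h2 : j = M
  · omega
  · rw [if_pos h1, if_neg h2] at h; exact absurd h.symm (pvStr_ne_WATER j)
  · rw [if_neg h1, if_pos h2] at h; exact absurd h (pvStr_ne_WATER i)
  · rw [if_neg h1, if_neg h2] at h; exact pvStr_inj hi0 hj0 h

-- ---------- chains and roots ----------
lemma pvIter_add (p : List Int) (a b : Nat) (i : Int) :
    pvIter p (a + b) i = pvIter p b (pvIter p a i) := by
  induction a generalizing i with
  | zero => simp [pvIter]
  | succ a IH =>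
    rw [Nat.succ_add]
    show pvIter p (a + b) (pvPar p i) = pvIter p b (pvIter p a (pvPar p i))
    exact IH (pvPar p i)

lemma pvIter_fix (p : List Int) {r : Int} (h : pvPar p r = r) : ∀ k, pvIter p k r = r := by
  intro k
  induction k with
  | zero => rfl
  | succ k IH => show pvIter p k (pvPar p r) = r; rw [h]; exact IH

lemma pvRoot_unique {p : List Int} {i r1 r2 : Int}
    (h1 : pvRootRel p i r1) (h2 : pvRootRel p i r2) : r1 = r2 := by
  obtain ⟨⟨k1, e1⟩, f1⟩ := h1
  obtain ⟨⟨k2, e2⟩, f2⟩ := h2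
  rcases le_total k1 k2 with hle | hle
  · have : pvIter p k2 i = pvIter p (k2 - k1) (pvIter p k1 i) := by
      rw [← pvIter_add]; congr 1; omega
    rw [e2, e1, pvIter_fix p f1] at this
    exact this.symm
  · have : pvIter p k1 i = pvIter p (k1 - k2) (pvIter p k2 i) := by
      rw [← pvIter_add]; congr 1; omega
    rw [e1, e2, pvIter_fix p f2] at this
    exact this

lemma pvChain_step {p : List Int} {i r : Int} (h : pvChain p (pvPar p i) r) : pvChain p i r := by
  obtain ⟨k, e⟩ := h
  exact ⟨k + 1, e⟩

lemma pvRootRel_self {p : List Int} {r : Int} (h : pvPar p r = r) : pvRootRel p r r :=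
  ⟨⟨0, rfl⟩, h⟩

-- chain membership stays inside the nodes, and ranks grow strictly along it
lemma pvChain_nodes {M : Int} {p : List Int}
    (hP1 : ∀ i, 0 ≤ i → i ≤ M → 0 ≤ pvPar p i ∧ pvPar p i ≤ M) :
    ∀ k i, 0 ≤ i → i ≤ M → 0 ≤ pvIter p k i ∧ pvIter p k i ≤ M := by
  intro k
  induction k with
  | zero => intro i h0 h1; exact ⟨h0, h1⟩
  | succ k IH =>
    intro i h0 h1
    have := hP1 i h0 h1
    exact IH (pvPar p i) this.1 this.2

lemma pvRk_mono {M : Int} {p rks : List Int}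
    (hP1 : ∀ i, 0 ≤ i → i ≤ M → 0 ≤ pvPar p i ∧ pvPar p i ≤ M)
    (hP2 : ∀ i, 0 ≤ i → i ≤ M → pvPar p i ≠ i → pvRk rks i < pvRk rks (pvPar p i)) :
    ∀ k i, 0 ≤ i → i ≤ M → pvRk rks i ≤ pvRk rks (pvIter p k i) := by
  intro k
  induction k with
  | zero => intro i _ _; exact le_refl _
  | succ k IH =>
    intro i h0 h1
    have hn := hP1 i h0 h1
    have hrec := IH (pvPar p i) hn.1 hn.2
    by_cases h : pvPar p i = i
    · show pvRk rks i ≤ pvRk rks (pvIter p k (pvPar p i))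
      rw [h]; rw [h] at hrec; exact hrec
    · have := hP2 i h0 h1 h
      show pvRk rks i ≤ pvRk rks (pvIter p k (pvPar p i))
      omega

lemma pvRootsCount_pos {M : Int} {p : List Int}
    (h : ∃ r, 0 ≤ r ∧ r ≤ M ∧ pvPar p r = r) : 1 ≤ pvRootsCount M p := by
  obtain ⟨r, h0, h1, h2⟩ := h
  have hmem : r ∈ (PySem.List.pyRange 0 (M+1)).filter (fun i => pvPar p i == i) := by
    refine List.mem_filter.mpr ⟨?_, by simp [h2]⟩
    rw [PySem.List.mem_pyRange_one]; omega
  have := List.length_pos_of_mem hmem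
  unfold pvRootsCount
  omega

lemma pvRk_le_M {M : Int} {p rks : List Int} (hInv : pvInvP M p rks) :
    ∀ i, 0 ≤ i → i ≤ M → pvRk rks i ≤ M := by
  intro i h0 h1
  obtain ⟨_, _, _, _, _, hP3, hP5⟩ := hInv
  have := hP3 i h0 h1
  have := pvRootsCount_pos hP5
  omega

-- every node has a root (uses the rank bound for termination)
lemma pvRoot_exists {M : Int} {p rks : List Int} (hInv : pvInvP M p rks) :
    ∀ i, 0 ≤ i → i ≤ M → ∃ r, 0 ≤ r ∧ r ≤ M ∧ pvRootRel p i r := by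
  have hrkM := pvRk_le_M hInv
  obtain ⟨hlp, hlr, hP1, hP4, hP2, hP3, hP5⟩ := hInv
  have key : ∀ (fuel : Nat) i, 0 ≤ i → i ≤ M → (M + 1 - pvRk rks i).toNat < fuel →
      ∃ r, 0 ≤ r ∧ r ≤ M ∧ pvRootRel p i r := by
    intro fuel
    induction fuel with
    | zero => intro i h0 h1 h2; omega
    | succ fuel IH =>
      intro i h0 h1 hf
      by_cases h : pvPar p i = i
      · exact ⟨i, h0, h1, pvRootRel_self h⟩
      · have hn := hP1 i h0 h1
        have hlt := hP2 i h0 h1 h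
        have hb := hrkM (pvPar p i) hn.1 hn.2
        obtain ⟨r, r0, r1, hr⟩ := IH (pvPar p i) hn.1 hn.2 (by omega)
        exact ⟨r, r0, r1, ⟨pvChain_step hr.1, hr.2⟩⟩
  intro i h0 h1
  exact key ((M + 1 - pvRk rks i).toNat + 1) i h0 h1 (by omega)

-- reading/writing one cell
lemma pvPar_pySetD {p : List Int} {x : Int} (v : Int) (hx0 : 0 ≤ x) (hx : x.toNat < p.length) :
    ∀ j, 0 ≤ j → pvPar (PySem.List.pySetD p x v) j = if j = x then v else pvPar p j := by
  intro j hj0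
  unfold pvPar
  rw [PySem.List.pySetD_of_nonneg _ _ hx0,
    PySem.List.pyGetD_of_nonneg _ _ hj0, PySem.List.pyGetD_of_nonneg _ _ hj0]
  by_cases h : j = x
  · subst h
    rw [if_pos rfl]
    rw [List.getD_eq_getElem?_getD, List.getElem?_set_self (by omega)]
    rfl
  · rw [if_neg h]
    have hne : x.toNat ≠ j.toNat := by omega
    rw [List.getD_eq_getElem?_getD, List.getD_eq_getElem?_getD, List.getElem?_set_ne hne]

-- countP after changing the predicate at a single element
lemma pvCountP_update {α : Type} [DecidableEq α] (f g : α → Bool) :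
    ∀ (l : List α) (x : α), l.Nodup → x ∈ l → (∀ y ∈ l, y ≠ x → f y = g y) →
    (l.countP f : Int) - (if f x then 1 else 0) = (l.countP g : Int) - (if g x then 1 else 0) := by
  intro l
  induction l with
  | nil => intro x _ hx; exact absurd hx (List.not_mem_nil)
  | cons a l IH =>
    intro x hnd hx hfg
    rw [List.countP_cons, List.countP_cons]
    rcases List.mem_cons.mp hx with rfl | hxl
    · have : l.countP f = l.countP g := by
        apply List.countP_congr
        intro y hy
        simp [hfg y (List.mem_cons_of_mem _ hy) (fun he => (List.nodup_cons.mp hnd).1 (he ▸ hy))]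
      rw [this]
      by_cases hfa : f x <;> by_cases hga : g x <;> simp [hfa, hga] <;> omega
    · have hax : a ≠ x := fun he => (List.nodup_cons.mp hnd).1 (he ▸ hxl)
      have hfa := hfg a (List.mem_cons_self) hax
      have := IH x (List.nodup_cons.mp hnd).2 hxl
        (fun y hy hyx => hfg y (List.mem_cons_of_mem _ hy) hyx)
      rw [hfa]
      by_cases hga : g a <;> simp [hga] at * <;> omega

lemma pvRootsCount_pySetD {M : Int} {p : List Int} {x v : Int}
    (hx0 : 0 ≤ x) (hxM : x ≤ M) (hlen : p.length = (M+1).toNat) (hv : v ≠ x) :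
    pvRootsCount M (PySem.List.pySetD p x v)
      = pvRootsCount M p - (if pvPar p x = x then 1 else 0) := by
  have hxlt : x.toNat < p.length := by omega
  have hpar' := pvPar_pySetD v hx0 hxlt
  unfold pvRootsCount
  rw [← List.countP_eq_length_filter, ← List.countP_eq_length_filter]
  have := pvCountP_update (fun i => pvPar (PySem.List.pySetD p x v) i == i)
    (fun i => pvPar p i == i) (PySem.List.pyRange 0 (M+1)) x
    (PySem.List.nodup_pyRange_one 0 (M+1))
    (by rw [PySem.List.mem_pyRange_one]; omega)
    (by
      intro y hy hyx
      rw [PySem.List.mem_pyRange_one] at hy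
      simp only [hpar' y (by omega), if_neg hyx])
  have hfx : (pvPar (PySem.List.pySetD p x v) x == x) = false := by
    rw [hpar' x hx0, if_pos rfl]; simp [hv]
  simp only [] at this
  simp only [hfx] at this
  by_cases hx : pvPar p x = x <;> simp [hx] at this ⊢ <;> omega

lemma pvSame_iff_eq {q : List Int} {j k rj rk : Int}
    (hrj : pvRootRel q j rj) (hrk : pvRootRel q k rk) : pvSame q j k ↔ rj = rk := by
  constructor
  · rintro ⟨r, a, b⟩
    rw [← pvRoot_unique a hrj, ← pvRoot_unique b hrk]
  · intro h
    exact ⟨rj, hrj, h ▸ hrk⟩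

lemma pvRk_pySetD {r : List Int} {x : Int} (v : Int) (hx0 : 0 ≤ x) (hx : x.toNat < r.length) :
    ∀ j, 0 ≤ j → pvRk (PySem.List.pySetD r x v) j = if j = x then v else pvRk r j :=
  pvPar_pySetD v hx0 hx

-- root surgery: redirecting x to a root v rewires x's class and nothing else
lemma pvSurg {M : Int} {p : List Int} {x v : Int}
    (hP1 : ∀ i, 0 ≤ i → i ≤ M → 0 ≤ pvPar p i ∧ pvPar p i ≤ M)
    (hlen : p.length = (M+1).toNat)
    (hx0 : 0 ≤ x) (hxM : x ≤ M) (hv0 : 0 ≤ v) (hvM : v ≤ M)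
    (hxv : x ≠ v) (hvroot : pvPar p v = v)
    (hcase : pvPar p x = x ∨ pvRootRel p x v) :
    ∀ j, 0 ≤ j → j ≤ M → ∀ s,
      (pvRootRel (PySem.List.pySetD p x v) j s ↔
        ((pvRootRel p j s ∧ s ≠ x) ∨ (pvRootRel p j x ∧ s = v))) := by
  have hxlt : x.toNat < p.length := by omega
  have hpar' := pvPar_pySetD (p := p) v hx0 hxlt
  set p' := PySem.List.pySetD p x v with hp'
  intro j hj0 hjM s
  constructor
  · rintro ⟨⟨k, hk⟩, hroots⟩
    have C1 : ∀ k j, 0 ≤ j → j ≤ M → pvIter p' k j = s →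
        ((pvRootRel p j s ∧ s ≠ x) ∨ (pvRootRel p j x ∧ s = v)) := by
      intro k
      induction k with
      | zero =>
        intro j h0 h1 he
        change j = s at he
        subst he
        rw [hpar' j h0] at hroots
        by_cases hjx : j = x
        · rw [if_pos hjx] at hroots; omega
        · rw [if_neg hjx] at hroots
          exact Or.inl ⟨pvRootRel_self hroots, hjx⟩
      | succ k IH =>
        intro j h0 h1 he
        change pvIter p' k (pvPar p' j) = s at he
        rw [hpar' j h0] at he
        by_cases hjx : j = x
        · rw [if_pos hjx] at he
          rcases IH v hv0 hvM he with ⟨hrel, hsne⟩ | ⟨hrel, hsv⟩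
          · have hsv : s = v := pvRoot_unique hrel (pvRootRel_self hvroot)
            rcases hcase with hxr | hxv'
            · right
              refine ⟨?_, hsv⟩
              rw [hjx]
              exact pvRootRel_self hxr
            · left
              refine ⟨?_, hsne⟩
              rw [hjx, hsv]
              exact hxv'
          · have : x = v := pvRoot_unique hrel (pvRootRel_self hvroot)
            omega
        · rw [if_neg hjx] at he
          have hn := hP1 j h0 h1
          rcases IH (pvPar p j) hn.1 hn.2 he with ⟨⟨hc, hr⟩, hsne⟩ | ⟨⟨hc, hr⟩, hsv⟩
          · exact Or.inl ⟨⟨pvChain_step hc, hr⟩, hsne⟩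
          · exact Or.inr ⟨⟨pvChain_step hc, hr⟩, hsv⟩
    exact C1 k j hj0 hjM hk
  · rintro (⟨⟨⟨k, hk⟩, hroot⟩, hsx⟩ | ⟨⟨⟨k, hk⟩, hrootx⟩, hsv⟩)
    · have hs0 : 0 ≤ s ∧ s ≤ M := hk ▸ pvChain_nodes hP1 k j hj0 hjM
      have hroot' : pvPar p' s = s := by
        rw [hpar' s hs0.1, if_neg hsx]; exact hroot
      have C2 : ∀ k j, 0 ≤ j → j ≤ M → pvIter p k j = s → pvChain p' j s := by
        intro k
        induction k with
        | zero => intro j _ _ he; exact ⟨0, he⟩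
        | succ k IH =>
          intro j h0 h1 he
          change pvIter p k (pvPar p j) = s at he
          by_cases hjx : j = x
          · rcases hcase with hxr | hxv'
            · have hfix : pvIter p (k+1) j = j := by
                rw [hjx]; exact pvIter_fix p hxr (k+1)
              rw [show pvIter p (k+1) j = pvIter p k (pvPar p j) from rfl, he] at hfix
              have : s = x := by omega
              exact (hsx this).elim
            · have hrel : pvRootRel p j s := ⟨⟨k+1, he⟩, hroot⟩
              have hrel' : pvRootRel p j v := by rw [hjx]; exact hxv'
              have hsv : s = v := pvRoot_unique hrel hrel'
              refine ⟨1, ?_⟩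
              show pvIter p' 0 (pvPar p' j) = s
              rw [hpar' j h0, if_pos hjx]
              change v = s
              exact hsv.symm
          · have hn := hP1 j h0 h1
            obtain ⟨kk, ekk⟩ := IH (pvPar p j) hn.1 hn.2 he
            refine ⟨kk + 1, ?_⟩
            show pvIter p' kk (pvPar p' j) = s
            rw [hpar' j h0, if_neg hjx]
            exact ekk
      exact ⟨C2 k j hj0 hjM hk, hroot'⟩
    · have hroot' : pvPar p' s = s := by
        rw [hsv, hpar' v hv0, if_neg (by omega)]; exact hvroot
      have C3 : ∀ k j, 0 ≤ j → j ≤ M → pvIter p k j = x → pvChain p' j x := by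
        intro k
        induction k with
        | zero => intro j _ _ he; exact ⟨0, he⟩
        | succ k IH =>
          intro j h0 h1 he
          change pvIter p k (pvPar p j) = x at he
          by_cases hjx : j = x
          · exact ⟨0, hjx⟩
          · have hn := hP1 j h0 h1
            obtain ⟨kk, ekk⟩ := IH (pvPar p j) hn.1 hn.2 he
            refine ⟨kk + 1, ?_⟩
            show pvIter p' kk (pvPar p' j) = x
            rw [hpar' j h0, if_neg hjx]
            exact ekk
      obtain ⟨kk, ekk⟩ := C3 k j hj0 hjM hk
      refine ⟨⟨kk + 1, ?_⟩, hroot'⟩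
      rw [pvIter_add p' kk 1, ekk]
      show pvPar p' x = s
      rw [hpar' x hx0, if_pos rfl, hsv]

-- ---------- the find/union specifications ----------
lemma pvFindA_spec {M : Int} (wm : PySem.Dict String Int) (inv : PySem.Dict Int String)
    (hM : 0 ≤ M)
    (HW : ∀ i, 0 ≤ i → i ≤ M → wm.getD (pvName M i) 0 = i)
    (HI : ∀ i, 0 ≤ i → i ≤ M → inv.getD i "" = pvName M i) :
    ∀ (fuel : Nat) (p rks : List Int) (i : Int), pvInvP M p rks → 0 ≤ i → i ≤ M →
      (M + 1 - pvRk rks i).toNat < fuel →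
      (pvRootRel p i (pvFindA wm inv fuel p (pvName M i)).2 ∧
       0 ≤ (pvFindA wm inv fuel p (pvName M i)).2 ∧
       (pvFindA wm inv fuel p (pvName M i)).2 ≤ M ∧
       (∀ j, 0 ≤ j → j ≤ M → ∀ s,
          (pvRootRel (pvFindA wm inv fuel p (pvName M i)).1 j s ↔ pvRootRel p j s)) ∧
       pvInvP M (pvFindA wm inv fuel p (pvName M i)).1 rks ∧
       (∀ j, 0 ≤ j → j ≤ M → pvRk rks j < pvRk rks i →
          pvPar (pvFindA wm inv fuel p (pvName M i)).1 j = pvPar p j)) := by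
  intro fuel
  induction fuel with
  | zero => intro p rks i hInv h0 h1 hf; omega
  | succ fuel IH =>
    intro p rks i hInv h0 h1 hf
    have hrkM := pvRk_le_M hInv
    have hInv' := hInv
    obtain ⟨hlp, hlr, hP1, hP4, hP2, hP3, hP5⟩ := hInv'
    have hidx : wm.getD (pvName M i) 0 = i := HW i h0 h1
    by_cases hroot : pvPar p i = i
    · have heval : pvFindA wm inv (fuel+1) p (pvName M i) = (p, pvPar p i) := by
        simp only [pvFindA, hidx]
        rw [if_neg (by simpa [pvPar] using hroot)]
        rfl
      rw [heval]
      refine ⟨?_, ?_, ?_, ?_, hInv, ?_⟩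
      · rw [hroot]; exact pvRootRel_self hroot
      · rw [hroot]; exact h0
      · rw [hroot]; exact h1
      · intro j _ _ s; rfl
      · intro j _ _ _; rfl
    · have hnode := hP1 i h0 h1
      have hinv' : inv.getD (pvPar p i) "" = pvName M (pvPar p i) := HI _ hnode.1 hnode.2
      have hlt := hP2 i h0 h1 hroot
      have hb := hrkM (pvPar p i) hnode.1 hnode.2
      obtain ⟨hrel, hr0, hrM, htrans, hinv2, huntouched⟩ :=
        IH p rks (pvPar p i) hInv hnode.1 hnode.2 (by omega)
      set res := pvFindA wm inv fuel p (pvName M (pvPar p i)) with hres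
      set r := res.2 with hr
      set p2 := PySem.List.pySetD res.1 i r with hp2
      have hlen2 : res.1.length = (M+1).toNat := hinv2.1
      have hilt : i.toNat < res.1.length := by omega
      have hpar2 := pvPar_pySetD (p := res.1) r h0 hilt
      rw [← hp2] at hpar2
      have heval : pvFindA wm inv (fuel+1) p (pvName M i) = (p2, pvPar p2 i) := by
        simp only [pvFindA, hidx]
        rw [if_pos (by simpa [pvPar] using hroot)]
        show (PySem.List.pySetD (pvFindA wm inv fuel p (inv.getD (PySem.List.pyGetD p i 0) "")).1 i
            (pvFindA wm inv fuel p (inv.getD (PySem.List.pyGetD p i 0) "")).2,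
          PySem.List.pyGetD (PySem.List.pySetD (pvFindA wm inv fuel p (inv.getD (PySem.List.pyGetD p i 0) "")).1 i
            (pvFindA wm inv fuel p (inv.getD (PySem.List.pyGetD p i 0) "")).2) i 0) = (p2, pvPar p2 i)
        rw [show PySem.List.pyGetD p i 0 = pvPar p i from rfl, hinv']
        rfl
      have hval : pvPar p2 i = r := by rw [hpar2 i h0, if_pos rfl]
      rw [heval, hval]
      -- rank of i is below rank of r
      have hrkir : pvRk rks i < pvRk rks r := by
        obtain ⟨⟨k, hk⟩, _⟩ := hrel
        have := pvRk_mono hP1 hP2 k (pvPar p i) hnode.1 hnode.2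
        rw [hk] at this
        omega
      have hir : i ≠ r := by intro he; rw [he] at hrkir; omega
      -- i is still a non-root in res.1
      have hpari2 : pvPar res.1 i = pvPar p i := huntouched i h0 h1 hlt
      -- r is a root of res.1
      have hrroot2 : pvPar res.1 r = r :=
        ((htrans r hr0 hrM r).mpr (pvRootRel_self hrel.2)).2
      have hreli2 : pvRootRel res.1 i r :=
        (htrans i h0 h1 r).mpr ⟨pvChain_step hrel.1, hrel.2⟩
      have hsurg := pvSurg (p := res.1) hinv2.2.2.1 hlen2 h0 h1 hr0 hrM hir hrroot2
        (Or.inr hreli2)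
      rw [← hp2] at hsurg
      obtain ⟨_, _, hP1b, hP4b, hP2b, hP3b, hP5b⟩ := hinv2
      refine ⟨⟨pvChain_step hrel.1, hrel.2⟩, hr0, hrM, ?_, ?_, ?_⟩
      · -- root relation preserved
        intro j hj0 hjM s
        show pvRootRel p2 j s ↔ pvRootRel p j s
        rw [hsurg j hj0 hjM s]
        constructor
        · rintro (⟨hs, _⟩ | ⟨hs, _⟩)
          · exact (htrans j hj0 hjM s).mp hs
          · exact absurd hs.2 (by rw [hpari2]; exact hroot)
        · intro hs
          have hs2 := (htrans j hj0 hjM s).mpr hs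
          refine Or.inl ⟨hs2, ?_⟩
          intro he
          rw [he] at hs2
          exact hroot (by rw [← hpari2]; exact hs2.2)
      · -- invariant for p2
        have hcount : pvRootsCount M p2 = pvRootsCount M res.1 := by
          rw [hp2, pvRootsCount_pySetD h0 h1 hlen2 (by omega)]
          rw [if_neg (by rw [hpari2]; exact hroot)]
          ring
        show pvInvP M p2 rks
        refine ⟨by rw [hp2, PySem.List.length_pySetD]; exact hlen2, hlr, ?_, hP4, ?_, ?_, ?_⟩
        · intro j hj0 hjM
          rw [hpar2 j hj0]
          by_cases hji : j = i
          · rw [if_pos hji]; exact ⟨hr0, hrM⟩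
          · rw [if_neg hji]; exact hP1b j hj0 hjM
        · intro j hj0 hjM hne
          rw [hpar2 j hj0] at hne ⊢
          by_cases hji : j = i
          · rw [if_pos hji] at hne ⊢
            rw [hji]
            exact hrkir
          · rw [if_neg hji] at hne ⊢
            exact hP2b j hj0 hjM hne
        · intro j hj0 hjM
          rw [hcount]
          exact hP3b j hj0 hjM
        · refine ⟨r, hr0, hrM, ?_⟩
          rw [hpar2 r hr0, if_neg (by omega)]
          exact hrroot2
      · -- entries of lower rank untouched
        intro j hj0 hjM hjlt
        show pvPar p2 j = pvPar p j
        rw [hpar2 j hj0, if_neg (by intro he; rw [he] at hjlt; omega)]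
        exact huntouched j hj0 hjM (by omega)

lemma pvUnionA_spec {M : Int} (wm : PySem.Dict String Int) (inv : PySem.Dict Int String)
    (hM : 0 ≤ M)
    (HW : ∀ i, 0 ≤ i → i ≤ M → wm.getD (pvName M i) 0 = i)
    (HI : ∀ i, 0 ≤ i → i ≤ M → inv.getD i "" = pvName M i)
    (p rks : List Int) (u v : Int) (hInv : pvInvP M p rks)
    (hu0 : 0 ≤ u) (huM : u ≤ M) (hv0 : 0 ≤ v) (hvM : v ≤ M) :
    pvInvP M (pvUnionA wm inv p rks (pvName M u) (pvName M v)).1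
      (pvUnionA wm inv p rks (pvName M u) (pvName M v)).2.1 ∧
    (pvSame p u v →
      (pvUnionA wm inv p rks (pvName M u) (pvName M v)).2.2 = false ∧
      (∀ j, 0 ≤ j → j ≤ M → ∀ k, 0 ≤ k → k ≤ M →
        (pvSame (pvUnionA wm inv p rks (pvName M u) (pvName M v)).1 j k ↔ pvSame p j k))) ∧
    (¬ pvSame p u v →
      (pvUnionA wm inv p rks (pvName M u) (pvName M v)).2.2 = true ∧
      (∀ j, 0 ≤ j → j ≤ M → ∀ k, 0 ≤ k → k ≤ M →
        (pvSame (pvUnionA wm inv p rks (pvName M u) (pvName M v)).1 j k ↔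
          (pvSame p j k ∨ (pvSame p j u ∧ pvSame p v k) ∨ (pvSame p j v ∧ pvSame p u k))))) := by
  have hlp := hInv.1
  have hlr := hInv.2.1
  have hP4 := hInv.2.2.2.1
  have hfu1 : (M + 1 - pvRk rks u).toNat < p.length + 1 := by
    have := hP4 u hu0 huM; rw [hlp]; omega
  obtain ⟨hrelu, hps0, hpsM, htrans1, hinv1, _⟩ :=
    pvFindA_spec wm inv hM HW HI (p.length + 1) p rks u hInv hu0 huM hfu1
  set f1 := pvFindA wm inv (p.length + 1) p (pvName M u) with hf1
  have hfu2 : (M + 1 - pvRk rks v).toNat < f1.1.length + 1 := by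
    have := hP4 v hv0 hvM; rw [hinv1.1]; omega
  obtain ⟨hrelv2, hpt0, hptM, htrans2, hinv2, _⟩ :=
    pvFindA_spec wm inv hM HW HI (f1.1.length + 1) f1.1 rks v hinv1 hv0 hvM hfu2
  set f2 := pvFindA wm inv (f1.1.length + 1) f1.1 (pvName M v) with hf2
  set ps := f1.2 with hps
  set pt := f2.2 with hpt
  have hrelvp : pvRootRel p v pt := (htrans1 v hv0 hvM pt).mp hrelv2
  have htransAll : ∀ j, 0 ≤ j → j ≤ M → ∀ s, (pvRootRel f2.1 j s ↔ pvRootRel p j s) :=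
    fun j a b s => (htrans2 j a b s).trans (htrans1 j a b s)
  have hsame2p : ∀ j, 0 ≤ j → j ≤ M → ∀ k, 0 ≤ k → k ≤ M →
      (pvSame f2.1 j k ↔ pvSame p j k) := by
    intro j hj0 hjM k hk0 hkM
    constructor
    · rintro ⟨r, a, b⟩
      exact ⟨r, (htransAll j hj0 hjM r).mp a, (htransAll k hk0 hkM r).mp b⟩
    · rintro ⟨r, a, b⟩
      exact ⟨r, (htransAll j hj0 hjM r).mpr a, (htransAll k hk0 hkM r).mpr b⟩
  have hreluf2 : pvRootRel f2.1 u ps := (htransAll u hu0 huM ps).mpr hrelu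
  have hrelvf2 : pvRootRel f2.1 v pt := (htrans2 v hv0 hvM pt).mpr hrelv2
  have hUeq : pvUnionA wm inv p rks (pvName M u) (pvName M v) =
      (if ps = pt then (f2.1, rks, false)
       else if pvRk rks pt < pvRk rks ps then (PySem.List.pySetD f2.1 pt ps, rks, true)
       else if pvRk rks ps < pvRk rks pt then (PySem.List.pySetD f2.1 ps pt, rks, true)
       else (PySem.List.pySetD f2.1 ps pt, PySem.List.pySetD rks pt (pvRk rks pt + 1), true)) := rfl
  have hex := pvRoot_exists hinv2
  by_cases hcase : ps = pt
  · rw [hUeq, if_pos hcase]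
    dsimp only
    have hsameuv : pvSame p u v := ⟨ps, hrelu, by rw [hcase]; exact hrelvp⟩
    refine ⟨hinv2, fun _ => ⟨rfl, ?_⟩, fun hns => absurd hsameuv hns⟩
    intro j hj0 hjM k hk0 hkM
    exact hsame2p j hj0 hjM k hk0 hkM
  · have hnsame : ¬ pvSame p u v := by
      rintro ⟨r, h1, h2⟩
      exact hcase ((pvRoot_unique h1 hrelu).symm.trans (pvRoot_unique h2 hrelvp))
    -- generic treatment of the link  x := v'  (x, v' roots of f2.1)
    have hlink : ∀ x v' : Int, 0 ≤ x → x ≤ M → 0 ≤ v' → v' ≤ M → x ≠ v' →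
        pvPar f2.1 x = x → pvPar f2.1 v' = v' →
        ((x = ps ∧ v' = pt) ∨ (x = pt ∧ v' = ps)) →
        (∀ j, 0 ≤ j → j ≤ M → ∀ k, 0 ≤ k → k ≤ M →
          (pvSame (PySem.List.pySetD f2.1 x v') j k ↔
            (pvSame p j k ∨ (pvSame p j u ∧ pvSame p v k) ∨ (pvSame p j v ∧ pvSame p u k)))) := by
      intro x v' hx0 hxM hv'0 hv'M hxv hxr hv'r hor j hj0 hjM k hk0 hkM
      have hsurg := pvSurg (p := f2.1) hinv2.2.2.1 hinv2.1 hx0 hxM hv'0 hv'M hxv hv'r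
        (Or.inl hxr)
      obtain ⟨rj, hrj0, hrjM, hrj⟩ := hex j hj0 hjM
      obtain ⟨rk, hrk0, hrkM', hrk⟩ := hex k hk0 hkM
      have hnj : pvRootRel (PySem.List.pySetD f2.1 x v') j (if rj = x then v' else rj) := by
        by_cases h : rj = x
        · rw [if_pos h]
          exact (hsurg j hj0 hjM v').mpr (Or.inr ⟨h ▸ hrj, rfl⟩)
        · rw [if_neg h]
          exact (hsurg j hj0 hjM rj).mpr (Or.inl ⟨hrj, h⟩)
      have hnk : pvRootRel (PySem.List.pySetD f2.1 x v') k (if rk = x then v' else rk) := by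
        by_cases h : rk = x
        · rw [if_pos h]
          exact (hsurg k hk0 hkM v').mpr (Or.inr ⟨h ▸ hrk, rfl⟩)
        · rw [if_neg h]
          exact (hsurg k hk0 hkM rk).mpr (Or.inl ⟨hrk, h⟩)
      rw [pvSame_iff_eq hnj hnk]
      rw [← hsame2p j hj0 hjM k hk0 hkM,
          ← hsame2p j hj0 hjM u hu0 huM,
          ← hsame2p v hv0 hvM k hk0 hkM,
          ← hsame2p j hj0 hjM v hv0 hvM,
          ← hsame2p u hu0 huM k hk0 hkM]
      rw [pvSame_iff_eq hrj hrk, pvSame_iff_eq hrj hreluf2, pvSame_iff_eq hrelvf2 hrk,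
          pvSame_iff_eq hrj hrelvf2, pvSame_iff_eq hreluf2 hrk]
      rcases hor with ⟨he1, he2⟩ | ⟨he1, he2⟩ <;> split_ifs <;> omega
    -- invariants for the three rank branches
    have hptlt : pt.toNat < f2.1.length := by rw [hinv2.1]; omega
    have hpslt : ps.toNat < f2.1.length := by rw [hinv2.1]; omega
    obtain ⟨hl2, hlr2, hP1b, hP4b, hP2b, hP3b, hP5b⟩ := hinv2
    rcases lt_trichotomy (pvRk rks pt) (pvRk rks ps) with hrk | hrk | hrk
    · -- rs > rt : parents[pt] := ps
      rw [hUeq, if_neg hcase, if_pos hrk]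
      dsimp only
      have hpar3 := pvPar_pySetD (p := f2.1) ps hpt0 hptlt
      have hcnt := pvRootsCount_pySetD (p := f2.1) (x := pt) (v := ps) hpt0 hptM hl2
        (fun he => hcase (by omega))
      rw [hrelvf2.2, if_pos rfl] at hcnt
      refine ⟨⟨by rw [PySem.List.length_pySetD]; exact hl2, hlr2, ?_, hP4b, ?_, ?_, ?_⟩,
        fun hs => absurd hs hnsame, fun _ => ⟨rfl, ?_⟩⟩
      · intro j hj0 hjM
        rw [hpar3 j hj0]
        by_cases h : j = pt
        · rw [if_pos h]; exact ⟨hps0, hpsM⟩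
        · rw [if_neg h]; exact hP1b j hj0 hjM
      · intro j hj0 hjM hne
        rw [hpar3 j hj0] at hne ⊢
        by_cases h : j = pt
        · rw [if_pos h] at hne ⊢
          rw [h]; exact hrk
        · rw [if_neg h] at hne ⊢
          exact hP2b j hj0 hjM hne
      · intro j hj0 hjM
        have := hP3b j hj0 hjM
        omega
      · refine ⟨ps, hps0, hpsM, ?_⟩
        rw [hpar3 ps hps0, if_neg (fun he => hcase (by omega)), hreluf2.2]
      · exact hlink pt ps hpt0 hptM hps0 hpsM (fun he => hcase (by omega))
          hrelvf2.2 hreluf2.2 (Or.inr ⟨rfl, rfl⟩)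
    · -- rs = rt : parents[ps] := pt, ranks[pt] += 1
      rw [hUeq, if_neg hcase, if_neg (by omega), if_neg (by omega)]
      dsimp only
      have hpar3 := pvPar_pySetD (p := f2.1) pt hps0 hpslt
      have hptltr : pt.toNat < rks.length := by rw [hlr]; omega
      have hrk3 := pvRk_pySetD (r := rks) (pvRk rks pt + 1) hpt0 hptltr
      have hcnt := pvRootsCount_pySetD (p := f2.1) (x := ps) (v := pt) hps0 hpsM hl2 (fun he => hcase (by omega))
      rw [hreluf2.2, if_pos rfl] at hcnt
      refine ⟨⟨by rw [PySem.List.length_pySetD]; exact hl2,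
        by rw [PySem.List.length_pySetD]; exact hlr, ?_, ?_, ?_, ?_, ?_⟩,
        fun hs => absurd hs hnsame, fun _ => ⟨rfl, ?_⟩⟩
      · intro j hj0 hjM
        rw [hpar3 j hj0]
        by_cases h : j = ps
        · rw [if_pos h]; exact ⟨hpt0, hptM⟩
        · rw [if_neg h]; exact hP1b j hj0 hjM
      · intro j hj0 hjM
        rw [hrk3 j hj0]
        by_cases h : j = pt
        · rw [if_pos h]; have := hP4 pt hpt0 hptM; omega
        · rw [if_neg h]; exact hP4 j hj0 hjM
      · intro j hj0 hjM hne
        rw [hpar3 j hj0] at hne ⊢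
        by_cases h : j = ps
        · rw [if_pos h] at hne ⊢
          rw [h]
          rw [hrk3 ps hps0, hrk3 pt hpt0, if_pos rfl, if_neg (by omega : ¬(ps = pt))]
          omega
        · rw [if_neg h] at hne ⊢
          rw [hrk3 j hj0, hrk3 (pvPar f2.1 j) (hP1b j hj0 hjM).1]
          by_cases hj : j = pt
          · exact absurd (hj ▸ hrelvf2.2) hne
          · rw [if_neg hj]
            by_cases hpj : pvPar f2.1 j = pt
            · rw [if_pos hpj]
              have := hP2b j hj0 hjM hne
              rw [hpj] at this
              omega
            · rw [if_neg hpj]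
              exact hP2b j hj0 hjM hne
      · intro j hj0 hjM
        rw [hrk3 j hj0]
        by_cases h : j = pt
        · rw [if_pos h]
          have := hP3b pt hpt0 hptM
          omega
        · rw [if_neg h]
          have := hP3b j hj0 hjM
          omega
      · refine ⟨pt, hpt0, hptM, ?_⟩
        rw [hpar3 pt hpt0, if_neg (fun he => hcase (by omega)), hrelvf2.2]
      · exact hlink ps pt hps0 hpsM hpt0 hptM hcase hreluf2.2 hrelvf2.2 (Or.inl ⟨rfl, rfl⟩)
    · -- rs < rt : parents[ps] := pt
      rw [hUeq, if_neg hcase, if_neg (by omega), if_pos hrk]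
      dsimp only
      have hpar3 := pvPar_pySetD (p := f2.1) pt hps0 hpslt
      have hcnt := pvRootsCount_pySetD (p := f2.1) (x := ps) (v := pt) hps0 hpsM hl2 (fun he => hcase (by omega))
      rw [hreluf2.2, if_pos rfl] at hcnt
      refine ⟨⟨by rw [PySem.List.length_pySetD]; exact hl2, hlr2, ?_, hP4b, ?_, ?_, ?_⟩,
        fun hs => absurd hs hnsame, fun _ => ⟨rfl, ?_⟩⟩
      · intro j hj0 hjM
        rw [hpar3 j hj0]
        by_cases h : j = ps
        · rw [if_pos h]; exact ⟨hpt0, hptM⟩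
        · rw [if_neg h]; exact hP1b j hj0 hjM
      · intro j hj0 hjM hne
        rw [hpar3 j hj0] at hne ⊢
        by_cases h : j = ps
        · rw [if_pos h] at hne ⊢
          rw [h]; exact hrk
        · rw [if_neg h] at hne ⊢
          exact hP2b j hj0 hjM hne
      · intro j hj0 hjM
        have := hP3b j hj0 hjM
        omega
      · refine ⟨pt, hpt0, hptM, ?_⟩
        rw [hpar3 pt hpt0, if_neg (fun he => hcase (by omega)), hrelvf2.2]
      · exact hlink ps pt hps0 hpsM hpt0 hptM hcase hreluf2.2 hrelvf2.2 (Or.inl ⟨rfl, rfl⟩)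

-- the node-name list is duplicate-free
lemma pvNames_nodup (M : Int) :
    (((PySem.List.pyRange 0 (M+1)).map (fun i => pvName M i))).Nodup := by
  refine List.Nodup.map_on ?_ (PySem.List.nodup_pyRange_one 0 (M+1))
  intro x hx y hy h
  rw [PySem.List.mem_pyRange_one] at hx hy
  exact pvName_inj (by omega) (by omega) (by omega) (by omega) h

-- ---------- the B-side dict ----------
lemma pvRelabel_items {M : Int} (comp : PySem.Dict String Int) (g : Int → Int)
    (hitems : comp.items = (PySem.List.pyRange 0 (M+1)).map (fun i => (pvName M i, g i)))
    (hM : 0 ≤ M) (cu cv : Int) :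
    (comp.items.foldl (fun d q => d.insert q.1 (if q.2 = cu then cv else q.2))
        (PySem.Dict.empty : PySem.Dict String Int)).items
      = (PySem.List.pyRange 0 (M+1)).map (fun i => (pvName M i, if g i = cu then cv else g i)) := by
  have hkeysnodup : (comp.items.map Prod.fst).Nodup := by
    rw [hitems, List.map_map]
    exact pvNames_nodup M
  rw [PySem.Dict.items_foldl_insert_fresh comp.items Prod.fst
    (fun q => if q.2 = cu then cv else q.2) PySem.Dict.empty
    (fun a _ => by simp) hkeysnodup]
  rw [hitems, List.map_map]
  rfl

lemma pvCf_of_items {M : Int} (comp : PySem.Dict String Int) (g : Int → Int)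
    (hitems : comp.items = (PySem.List.pyRange 0 (M+1)).map (fun i => (pvName M i, g i)))
    (hM : 0 ≤ M) :
    ∀ i, 0 ≤ i → i ≤ M → pvCf M comp i = g i := by
  intro i hi0 hiM
  have hmem : (pvName M i, g i) ∈ comp.items := by
    rw [hitems]
    exact List.mem_map.mpr ⟨i, by rw [PySem.List.mem_pyRange_one]; omega, rfl⟩
  have hnd : comp.keys.Nodup := by
    have hk : comp.keys = comp.items.map Prod.fst := rfl
    rw [hk, hitems, List.map_map]
    exact pvNames_nodup M
  unfold pvCf
  rw [PySem.Dict.getD_of_mem_items comp hmem hnd]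

-- ---------- the main fold ----------
lemma pvMain {M : Int} (wm : PySem.Dict String Int) (inv : PySem.Dict Int String)
    (hM : 0 ≤ M)
    (HW : ∀ i, 0 ≤ i → i ≤ M → wm.getD (pvName M i) 0 = i)
    (HI : ∀ i, 0 ≤ i → i ≤ M → inv.getD i "" = pvName M i) :
    ∀ (es : List (Int × String × String)),
      (∀ e ∈ es, ∃ a b, (0 ≤ a ∧ a ≤ M) ∧ (0 ≤ b ∧ b ≤ M) ∧
        e.2.1 = pvName M a ∧ e.2.2 = pvName M b) →
      ∀ (p rks : List Int) (comp : PySem.Dict String Int) (tot : Int) (g : Int → Int),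
        pvInvP M p rks →
        comp.items = (PySem.List.pyRange 0 (M+1)).map (fun i => (pvName M i, g i)) →
        (∀ j, 0 ≤ j → j ≤ M → ∀ k, 0 ≤ k → k ≤ M → (pvSame p j k ↔ g j = g k)) →
        (es.foldl (fun st e =>
            let u := pvUnionA wm inv st.1 st.2.1 e.2.1 e.2.2
            (u.1, u.2.1, if u.2.2 then st.2.2 + e.1 else st.2.2))
          (p, rks, tot)).2.2
        = (es.foldl (fun st e =>
            let cu := st.1.getD e.2.1 0
            let cv := st.1.getD e.2.2 0
            if cu ≠ cv then
              (st.1.items.foldl (fun d q => d.insert q.1 (if q.2 = cu then cv else q.2))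
                (PySem.Dict.empty : PySem.Dict String Int), st.2 + e.1)
            else st)
          (comp, tot)).2 := by
  intro es
  induction es with
  | nil => intro _ p rks comp tot g _ _ _; rfl
  | cons e es IH =>
    intro hval p rks comp tot g hInv hitems hCF
    obtain ⟨a, b, ⟨ha0, haM⟩, ⟨hb0, hbM⟩, he1, he2⟩ := hval e List.mem_cons_self
    have hval' : ∀ e ∈ es, ∃ a b, (0 ≤ a ∧ a ≤ M) ∧ (0 ≤ b ∧ b ≤ M) ∧
        e.2.1 = pvName M a ∧ e.2.2 = pvName M b :=
      fun e he => hval e (List.mem_cons_of_mem _ he)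
    have hcf := pvCf_of_items comp g hitems hM
    rw [List.foldl_cons, List.foldl_cons]
    dsimp only
    rw [he1, he2]
    have hcu : comp.getD (pvName M a) 0 = g a := hcf a ha0 haM
    have hcv : comp.getD (pvName M b) 0 = g b := hcf b hb0 hbM
    rw [hcu, hcv]
    obtain ⟨hInvU, hfalse, htrue⟩ := pvUnionA_spec wm inv hM HW HI p rks a b hInv ha0 haM hb0 hbM
    by_cases hS : pvSame p a b
    · have hgab : g a = g b := (hCF a ha0 haM b hb0 hbM).mp hS
      obtain ⟨hbf, hiff⟩ := hfalse hS
      rw [hbf, if_neg (by omega : ¬(g a ≠ g b))]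
      simp only [Bool.false_eq_true, if_false]
      exact IH hval' _ _ comp tot g hInvU hitems
        (fun j hj0 hjM k hk0 hkM =>
          (hiff j hj0 hjM k hk0 hkM).trans (hCF j hj0 hjM k hk0 hkM))
    · have hgab : g a ≠ g b := fun h => hS ((hCF a ha0 haM b hb0 hbM).mpr h)
      obtain ⟨hbt, hiff⟩ := htrue hS
      rw [hbt, if_pos (by omega : g a ≠ g b)]
      simp only [if_true]
      refine IH hval' _ _ _ (tot + e.1) (fun i => if g i = g a then g b else g i) hInvU ?_ ?_
      · exact pvRelabel_items comp g hitems hM (g a) (g b)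
      · intro j hj0 hjM k hk0 hkM
        rw [hiff j hj0 hjM k hk0 hkM]
        rw [hCF j hj0 hjM k hk0 hkM, hCF j hj0 hjM a ha0 haM, hCF b hb0 hbM k hk0 hkM,
            hCF j hj0 hjM b hb0 hbM, hCF a ha0 haM k hk0 hkM]
        dsimp only
        split_ifs <;> omega

-- ===== VERDICT (by name: the statement is the Claim_ definition above) =====
theorem minCostToSupplyWater_spec : Claim_equal_minCostToSupplyWater := by
  intro n wells pipes hdom hpre
  unfold Spec_minCostToSupplyWater
  show minCostToSupplyWater n wells pipes = minCostToSupplyWater_alt n wells pipes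
  simp only [minCostToSupplyWater, minCostToSupplyWater_alt]
  rw [show pvStrB = pvStr from rfl, show pvKeyB = pvKey from rfl]
  have hpipes : pipes.map (fun p => (PySem.List.pyGetD p 2 0,
        pvStr (PySem.List.pyGetD p 0 0 - 1), pvStr (PySem.List.pyGetD p 1 0 - 1)))
      = pipes.map (fun l => match l with
        | [h1, h2, c] => (c, pvStr (h1 - 1), pvStr (h2 - 1))
        | _ => ((0 : Int), "", "")) := by
    apply List.map_congr_left
    intro l hl
    obtain ⟨hlen3, -, -, -, -⟩ := hpre l hl
    rcases l with _ | ⟨x, l⟩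
    · simp at hlen3
    rcases l with _ | ⟨y, l⟩
    · simp at hlen3
    rcases l with _ | ⟨c, l⟩
    · simp at hlen3
    rcases l with _ | ⟨z, l⟩
    swap
    · simp at hlen3
    rfl
  rw [hpipes]
  set M : Int := (wells.length : Int) with hMdef
  have hM : 0 ≤ M := by omega
  set wm0 := (PySem.List.enumerate wells).foldl (fun d p => d.insert (pvStr p.1) p.1)
    (PySem.Dict.empty : PySem.Dict String Int) with hwm0
  have hmemEnum : ∀ p ∈ PySem.List.enumerate wells, 0 ≤ p.1 ∧ p.1 < M := by
    intro p hp
    rw [PySem.List.mem_enumerate_iff] at hp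
    obtain ⟨k, hk, hpe⟩ := hp
    subst hpe
    constructor <;> simp <;> omega
  have hkeys0 : ((PySem.List.enumerate wells).map (fun p => pvStr p.1)).Nodup := by
    show List.Pairwise _ _
    rw [List.pairwise_map]
    refine List.Pairwise.imp_of_mem ?_ (PySem.List.pairwise_lt_enumerate wells 0)
    intro a b ha hb hlt heq
    have h1 := hmemEnum a ha
    have h2 := hmemEnum b hb
    have := pvStr_inj h1.1 h2.1 heq
    omega
  have hitems0 : wm0.items = (PySem.List.enumerate wells).map (fun p => (pvStr p.1, p.1)) := by
    rw [hwm0]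
    rw [PySem.Dict.items_foldl_insert_fresh (PySem.List.enumerate wells)
      (fun p => pvStr p.1) (fun p => p.1) PySem.Dict.empty (fun a _ => by simp) hkeys0]
    rfl
  have hsize0 : wm0.size = wells.length := by
    have h : wm0.size = wm0.items.length := rfl
    rw [h, hitems0, List.length_map, PySem.List.length_enumerate]
  have hw0c : wm0.contains "WATER" = false := by
    have hkeq : wm0.keys = (PySem.List.enumerate wells).map (fun p => pvStr p.1) := by
      have h : wm0.keys = wm0.items.map Prod.fst := rfl
      rw [h, hitems0, List.map_map]
      rfl
    have hnm : ¬ ("WATER" ∈ wm0.keys) := by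
      rw [hkeq]
      intro h
      obtain ⟨p, _, he⟩ := List.mem_map.mp h
      exact pvStr_ne_WATER p.1 he
    rw [PySem.Dict.contains_eq_decide_mem_keys, decide_eq_false hnm]
  have hcast : ((wm0.size : Nat) : Int) = M := by rw [hsize0]
  rw [hcast]
  set wmF := wm0.insert "WATER" M with hwmF
  have hitemsF : wmF.items = wm0.items ++ [("WATER", M)] := by
    rw [hwmF, PySem.Dict.items_insert]
    simp [hw0c]
  have hitemsPy : wmF.items = (PySem.List.pyRange 0 (M+1)).map (fun i => (pvName M i, i)) := by
    rw [hitemsF, hitems0]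
    rw [PySem.List.enumerate_eq_map_pyRange wells 0, List.map_map]
    rw [PySem.List.len_eq, ← hMdef]
    rw [PySem.List.pyRange_one_succ_right hM, List.map_append]
    congr 1
    · apply List.map_congr_left
      intro i hi
      rw [PySem.List.mem_pyRange_one] at hi
      have hne : i ≠ M := by omega
      simp [pvName, hne]
    · simp [pvName]
  have hkeysFnd : wmF.keys.Nodup := by
    have h : wmF.keys = wmF.items.map Prod.fst := rfl
    rw [h, hitemsPy, List.map_map]
    exact pvNames_nodup M
  have HW : ∀ i, 0 ≤ i → i ≤ M → wmF.getD (pvName M i) 0 = i := by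
    intro i h0 h1
    exact pvCf_of_items wmF (fun i => i) hitemsPy hM i h0 h1
  set invD := wmF.items.foldl (fun d p => d.insert p.2 p.1)
    (PySem.Dict.empty : PySem.Dict Int String) with hinvD
  have hsnd : (wmF.items.map (fun p => p.2)).Nodup := by
    rw [hitemsPy, List.map_map]
    have h : ((fun p => p.2) ∘ fun i => (pvName M i, i)) = fun (i : Int) => i := rfl
    rw [h, List.map_id']
    exact PySem.List.nodup_pyRange_one 0 (M+1)
  have hitemsInv : invD.items = (PySem.List.pyRange 0 (M+1)).map (fun i => (i, pvName M i)) := by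
    rw [hinvD]
    rw [PySem.Dict.items_foldl_insert_fresh wmF.items (fun p => p.2) (fun p => p.1)
      PySem.Dict.empty (fun a _ => by simp) hsnd]
    rw [hitemsPy, List.map_map]
    rfl
  have HI : ∀ i, 0 ≤ i → i ≤ M → invD.getD i "" = pvName M i := by
    intro i h0 h1
    have hmem : (i, pvName M i) ∈ invD.items := by
      rw [hitemsInv]
      exact List.mem_map.mpr ⟨i, by rw [PySem.List.mem_pyRange_one]; omega, rfl⟩
    have hnd : invD.keys.Nodup := by
      have h : invD.keys = invD.items.map Prod.fst := rfl
      rw [h, hitemsInv, List.map_map]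
      have h2 : (Prod.fst ∘ fun (i : Int) => (i, pvName M i)) = fun (i : Int) => i := rfl
      rw [h2, List.map_id']
      exact PySem.List.nodup_pyRange_one 0 (M+1)
    exact PySem.Dict.getD_of_mem_items invD hmem hnd ""
  have hsizeF : wmF.size = wells.length + 1 := by
    rw [hwmF, PySem.Dict.size_insert, hw0c]
    simp [hsize0]
  have hcast2 : ((wmF.size : Nat) : Int) = M + 1 := by rw [hsizeF]; push_cast; rw [hMdef]
  rw [hcast2]
  simp only [PySem.List.pyRepeat_singleton, PySem.List.len_eq, Int.toNat_natCast,
    PySem.List.length_pyRange_one, sub_zero]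
  -- initial union-find state
  have hpar0 : ∀ i, 0 ≤ i → i ≤ M → pvPar (PySem.List.pyRange 0 (M+1)) i = i := by
    intro i h0 h1
    unfold pvPar
    rw [PySem.List.pyGetD_of_nonneg _ _ h0, List.getD_eq_getElem?_getD]
    have hlt : i.toNat < (PySem.List.pyRange 0 (M+1)).length := by
      rw [PySem.List.length_pyRange_one]; omega
    rw [List.getElem?_eq_getElem hlt, PySem.List.getElem_pyRange_one]
    simp
    omega
  have hrk0 : ∀ i, 0 ≤ i → i ≤ M → pvRk (List.replicate (M+1).toNat 0) i = 0 := by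
    intro i h0 h1
    unfold pvRk
    rw [PySem.List.pyGetD_of_nonneg _ _ h0, List.getD_eq_getElem?_getD]
    rw [List.getElem?_replicate, if_pos (by omega)]
    rfl
  have hcount0 : pvRootsCount M (PySem.List.pyRange 0 (M+1)) = M + 1 := by
    unfold pvRootsCount
    rw [List.filter_eq_self.mpr ?_]
    · rw [PySem.List.length_pyRange_one]; omega
    · intro a ha
      rw [PySem.List.mem_pyRange_one] at ha
      simp [hpar0 a (by omega) (by omega)]
  have hInv0 : pvInvP M (PySem.List.pyRange 0 (M+1)) (List.replicate (M+1).toNat 0) := by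
    refine ⟨by rw [PySem.List.length_pyRange_one]; omega, by rw [List.length_replicate],
      ?_, ?_, ?_, ?_, ⟨0, le_refl 0, hM, hpar0 0 (le_refl 0) hM⟩⟩
    · intro i h0 h1
      rw [hpar0 i h0 h1]
      exact ⟨h0, h1⟩
    · intro i h0 h1
      rw [hrk0 i h0 h1]
    · intro i h0 h1 hne
      exact absurd (hpar0 i h0 h1) hne
    · intro i h0 h1
      rw [hrk0 i h0 h1, hcount0]
      omega
  have hCF0 : ∀ j, 0 ≤ j → j ≤ M → ∀ k, 0 ≤ k → k ≤ M →
      (pvSame (PySem.List.pyRange 0 (M+1)) j k ↔ j = k) := by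
    intro j hj0 hjM k hk0 hkM
    exact pvSame_iff_eq (pvRootRel_self (hpar0 j hj0 hjM)) (pvRootRel_self (hpar0 k hk0 hkM))
  -- every sorted edge names two nodes
  have hvalid : ∀ e ∈ PySem.List.sorted
      (((PySem.List.enumerate wells).map (fun p => (p.2, pvStr p.1, "WATER"))) ++
        pipes.map (fun l => match l with
          | [h1, h2, c] => (c, pvStr (h1 - 1), pvStr (h2 - 1))
          | _ => ((0 : Int), "", ""))) pvKey false,
      ∃ a b, (0 ≤ a ∧ a ≤ M) ∧ (0 ≤ b ∧ b ≤ M) ∧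
        e.2.1 = pvName M a ∧ e.2.2 = pvName M b := by
    intro e he
    rw [PySem.List.mem_sorted] at he
    rcases List.mem_append.mp he with hw | hp
    · obtain ⟨q, hq, hqe⟩ := List.mem_map.mp hw
      subst hqe
      have hb := hmemEnum q hq
      refine ⟨q.1, M, ⟨hb.1, by omega⟩, ⟨hM, le_refl M⟩, ?_, ?_⟩
      · show pvStr q.1 = pvName M q.1
        unfold pvName
        rw [if_neg (by omega)]
      · show "WATER" = pvName M M
        unfold pvName
        rw [if_pos rfl]
    · obtain ⟨l, hl, hle⟩ := List.mem_map.mp hp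
      subst hle
      obtain ⟨hlen3, h1a, h1b, h2a, h2b⟩ := hpre l hl
      rcases l with _ | ⟨x, l⟩
      · simp at hlen3
      rcases l with _ | ⟨y, l⟩
      · simp at hlen3
      rcases l with _ | ⟨c, l⟩
      · simp at hlen3
      rcases l with _ | ⟨z, l⟩
      swap
      · simp at hlen3
      simp only [List.getD_cons_zero, List.getD_cons_succ] at h1a h1b h2a h2b
      refine ⟨x - 1, y - 1, ⟨by omega, by omega⟩, ⟨by omega, by omega⟩, ?_, ?_⟩
      · show pvStr (x - 1) = pvName M (x - 1)
        unfold pvName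
        rw [if_neg (by omega)]
      · show pvStr (y - 1) = pvName M (y - 1)
        unfold pvName
        rw [if_neg (by omega)]
  exact pvMain wmF invD hM HW HI _ hvalid _ _ _ 0 (fun i => i) hInv0 hitemsPy hCF0
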